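-- pv_equiv track=rewrite | github.com/brentyJ/ReCog | _scripts/ingestion/chunker.py | _get_page_number
-- ===== SOURCE A (Python) =====
-- from typing import List, Optional, Tuple
--
-- def _get_page_number(
--
--     char_pos: int,
--     page_boundaries: Optional[List[int]]
-- ) -> Optional[int]:
--     """Get page number for a character position."""
--     if not page_boundaries:
--         return None
--
--     for i, boundary in enumerate(page_boundaries):
--         if char_pos < boundary:
--             return i  # 0-indexed
--
--     return len(page_boundaries) - 1
-- ===== SOURCE B (Python) =====
-- def _get_page_number(char_pos, page_boundaries):
--     """Binary search for the first boundary > char_pos (page_boundaries sorted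
--     ascending), clamped to the last page index."""
--     if not page_boundaries:
--         return None
--     lo, hi = 0, len(page_boundaries)
--     while lo < hi:
--         mid = (lo + hi) // 2
--         if page_boundaries[mid] <= char_pos:
--             lo = mid + 1
--         else:
--             hi = mid
--     return min(lo, len(page_boundaries) - 1)
-- ===== Notes on version B (the rewrite author's own statement) =====
-- stated objective: faster
-- what changed: Replaces A's linear left-to-right scan over enumerate(page_boundaries) with a hand-rolled bisect_right binary search clamped to len-1; Pre_ restricts to nondecreasing boundary lists, the function's natural domain (page boundaries are cumulative character offsets), since binary search is only meaningful there.
-- outside the precondition, e.g. on _get_page_number(2, [5, 1]): A returns 0, B returns 1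
import Mathlib
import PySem

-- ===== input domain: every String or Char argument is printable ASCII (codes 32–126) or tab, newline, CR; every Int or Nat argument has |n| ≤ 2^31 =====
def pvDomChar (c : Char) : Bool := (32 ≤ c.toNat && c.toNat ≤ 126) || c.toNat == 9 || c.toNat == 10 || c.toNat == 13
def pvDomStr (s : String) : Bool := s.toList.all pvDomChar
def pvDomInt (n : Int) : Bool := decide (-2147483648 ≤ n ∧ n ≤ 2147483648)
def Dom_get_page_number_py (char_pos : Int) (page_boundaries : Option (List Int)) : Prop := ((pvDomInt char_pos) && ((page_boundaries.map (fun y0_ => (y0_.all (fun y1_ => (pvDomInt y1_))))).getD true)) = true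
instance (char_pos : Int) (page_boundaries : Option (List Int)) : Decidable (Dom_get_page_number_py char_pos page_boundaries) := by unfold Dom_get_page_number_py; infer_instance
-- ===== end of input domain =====

-- B replaces A's linear scan by a bisect_right binary search (clamped to the last index);
-- on a nondecreasing boundary list it returns exactly A's value.

-- ===== PORT A =====
-- the `for i, boundary in enumerate(...)` loop, carrying the running index i
def pvAFind (char_pos : Int) (i : Nat) : List Int → Option Int
  | [] => none
  | b :: rest => if char_pos < b then some (Int.ofNat i) else pvAFind char_pos (i + 1) rest

def get_page_number_py (char_pos : Int) (page_boundaries : Option (List Int)) : Option Int :=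
  match page_boundaries with
  | none => none
  | some l =>
    if l.isEmpty then none
    else
      match pvAFind char_pos 0 l with
      | some i => some i
      | none => some ((l.length : Int) - 1)

-- ===== PORT B =====
-- the `while lo < hi` bisect_right loop of Source B (indexing is always in range when
-- called with hi ≤ l.length, so `getD` is exact there)
def pvBisect (l : List Int) (x : Int) (lo hi : Nat) : Nat :=
  if h : lo < hi then
    let mid := (lo + hi) / 2
    if l.getD mid 0 ≤ x then pvBisect l x (mid + 1) hi else pvBisect l x lo mid
  else lo
termination_by hi - lo
decreasing_by all_goals omega

def get_page_number_py_alt (char_pos : Int) (page_boundaries : Option (List Int)) : Option Int :=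
  match page_boundaries with
  | none => none
  | some l =>
    if l.isEmpty then none
    else
      let i := pvBisect l char_pos 0 l.length
      some (min (Int.ofNat i) ((l.length : Int) - 1))

-- ===== PRECONDITION & SPEC =====
-- Pre_ restricts to nondecreasing boundary lists: page boundaries are cumulative character
-- offsets, so this is the function's natural domain; on unsorted lists A still returns the
-- first index whose boundary exceeds char_pos, which a binary search cannot reproduce.
def Pre_get_page_number_py (char_pos : Int) (page_boundaries : Option (List Int)) : Prop :=
  (page_boundaries.getD []).Pairwise (· ≤ ·)
instance (char_pos : Int) (page_boundaries : Option (List Int)) : Decidable (Pre_get_page_number_py char_pos page_boundaries) := by unfold Pre_get_page_number_py; infer_instance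

def pvWitness_get_page_number_py : Int × Option (List Int) := (7, some [3, 9, 15])

def Spec_get_page_number_py (char_pos : Int) (page_boundaries : Option (List Int)) (out : Option Int) : Prop := out = get_page_number_py_alt char_pos page_boundaries
instance (char_pos : Int) (page_boundaries : Option (List Int)) (out : Option Int) : Decidable (Spec_get_page_number_py char_pos page_boundaries out) := by unfold Spec_get_page_number_py; infer_instance

-- ===== CLAIM (what is proved, stated in full; the proofs are below) =====
def Claim_equal_get_page_number_py : Prop := ∀ (char_pos : Int) (page_boundaries : Option (List Int)), Dom_get_page_number_py char_pos page_boundaries → Pre_get_page_number_py char_pos page_boundaries → Spec_get_page_number_py char_pos page_boundaries (get_page_number_py char_pos page_boundaries)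

-- ===== LEMMAS AND PROOFS =====

-- `idx l x` = length of the maximal prefix of l whose elements are ≤ x
def pvIdx (l : List Int) (x : Int) : Nat := (l.takeWhile (fun b => b ≤ x)).length

theorem pvIdx_le_length (l : List Int) (x : Int) : pvIdx l x ≤ l.length := by
  unfold pvIdx
  induction l with
  | nil => simp
  | cons b rest ih => by_cases hb : b ≤ x <;> simp [List.takeWhile, hb] <;> omega

-- elements strictly before pvIdx are ≤ x
theorem pvIdx_lt_le (l : List Int) (x : Int) (j : Nat) (hj : j < l.length)
    (h : j < pvIdx l x) : l[j] ≤ x := by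
  induction l generalizing j with
  | nil => simp at hj
  | cons b rest ih =>
    by_cases hb : b ≤ x
    · have he : pvIdx (b :: rest) x = pvIdx rest x + 1 := by
        unfold pvIdx; simp [List.takeWhile, hb]
      cases j with
      | zero => simpa using hb
      | succ j' =>
        simp only [List.getElem_cons_succ]
        exact ih j' (by simpa using hj) (by rw [he] at h; omega)
    · have he : pvIdx (b :: rest) x = 0 := by
        unfold pvIdx; simp [List.takeWhile, hb]
      rw [he] at h
      omega

-- the element at position pvIdx (if in range) is > x
theorem pvIdx_get_gt (l : List Int) (x : Int) (j : Nat) (hj : j < l.length)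
    (hidx : pvIdx l x = j) : x < l[j] := by
  induction l generalizing j with
  | nil => simp at hj
  | cons b rest ih =>
    by_cases hb : b ≤ x
    · have he : pvIdx (b :: rest) x = pvIdx rest x + 1 := by
        unfold pvIdx; simp [List.takeWhile, hb]
      cases j with
      | zero => omega
      | succ j' =>
        simp only [List.getElem_cons_succ]
        exact ih j' (by simpa using hj) (by omega)
    · have he : pvIdx (b :: rest) x = 0 := by
        unfold pvIdx; simp [List.takeWhile, hb]
      have : j = 0 := by omega
      subst this
      simpa using lt_of_not_ge hb

-- A's loop returns (i + pvIdx) when pvIdx is in range, none otherwise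
theorem pvAFind_eq (x : Int) (l : List Int) (i : Nat) :
    pvAFind x i l = if pvIdx l x < l.length then some (Int.ofNat (i + pvIdx l x)) else none := by
  induction l generalizing i with
  | nil => simp [pvAFind, pvIdx]
  | cons b rest ih =>
    by_cases hb : x < b
    · have he : pvIdx (b :: rest) x = 0 := by
        unfold pvIdx; simp [List.takeWhile, not_le.mpr hb]
      simp [pvAFind, hb, he]
    · have hb' : b ≤ x := le_of_not_gt hb
      have he : pvIdx (b :: rest) x = pvIdx rest x + 1 := by
        unfold pvIdx; simp [List.takeWhile, hb']
      simp only [pvAFind, if_neg hb, ih, he, List.length_cons]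
      by_cases hlt : pvIdx rest x < rest.length
      · rw [if_pos hlt, if_pos (by omega)]
        have harith : i + (pvIdx rest x + 1) = i + 1 + pvIdx rest x := by omega
        rw [harith]
      · rw [if_neg hlt, if_neg (by omega)]

-- sortedness as element-wise monotonicity
theorem pvSorted_mono (l : List Int) (hs : l.Pairwise (· ≤ ·)) (i j : Nat)
    (hij : i ≤ j) (hj : j < l.length) : l[i]'(by omega) ≤ l[j] := by
  rcases Nat.lt_or_ge i j with h | h
  · exact (List.pairwise_iff_getElem.mp hs) i j (by omega) hj h
  · have : i = j := by omega
    subst this; exact le_refl _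

-- binary-search correctness: with the invariant lo ≤ pvIdx ≤ hi ≤ length it lands on pvIdx
theorem pvBisect_correct (l : List Int) (x : Int) (hs : l.Pairwise (· ≤ ·)) :
    ∀ lo hi : Nat, hi ≤ l.length → lo ≤ pvIdx l x → pvIdx l x ≤ hi →
    pvBisect l x lo hi = pvIdx l x := by
  intro lo hi
  induction lo, hi using pvBisect.induct l x with
  | case1 lo hi h mid hle ih =>
    intro hhi hlo hup
    rw [pvBisect]
    simp only [dif_pos h]
    have hmid : mid < l.length := by omega
    have hgd : l.getD mid 0 = l[mid] := by
      simp [List.getD, List.getElem?_eq_getElem hmid]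
    rw [if_pos hle]
    -- l[mid] ≤ x forces pvIdx > mid
    have hgt : mid < pvIdx l x := by
      by_contra hc
      have hle2 : pvIdx l x ≤ mid := by omega
      have hr : pvIdx l x < l.length := by omega
      have h1 : x < l[pvIdx l x] := pvIdx_get_gt l x _ hr rfl
      have h2 : l[pvIdx l x]'hr ≤ l[mid] := pvSorted_mono l hs _ mid hle2 hmid
      rw [hgd] at hle
      omega
    exact ih hhi hgt hup
  | case2 lo hi h mid hgtc ih =>
    intro hhi hlo hup
    rw [pvBisect]
    simp only [dif_pos h]
    have hmid : mid < l.length := by omega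
    have hgd : l.getD mid 0 = l[mid] := by
      simp [List.getD, List.getElem?_eq_getElem hmid]
    rw [if_neg hgtc]
    -- x < l[mid] forces pvIdx ≤ mid
    have hlt : pvIdx l x ≤ mid := by
      by_contra hc
      have : l[mid] ≤ x := pvIdx_lt_le l x mid hmid (by omega)
      rw [hgd] at hgtc
      exact hgtc this
    exact ih (by omega) hlo hlt
  | case3 lo hi h =>
    intro hhi hlo hup
    rw [pvBisect]
    simp only [dif_neg h]
    omega

-- ===== VERDICT (by name: the statement is the Claim_ definition above) =====
theorem get_page_number_py_spec : Claim_equal_get_page_number_py := by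
  intro x pbs _hdom hpre
  unfold Spec_get_page_number_py
  match pbs with
  | none => rfl
  | some l =>
    simp only [get_page_number_py, get_page_number_py_alt]
    by_cases hne : l.isEmpty
    · simp [hne]
    · simp only [if_neg hne]
      have hlen : 0 < l.length := by
        cases l with
        | nil => simp at hne
        | cons a t => simp
      have hs : l.Pairwise (· ≤ ·) := hpre
      have hb : pvBisect l x 0 l.length = pvIdx l x :=
        pvBisect_correct l x hs 0 l.length (le_refl _) (Nat.zero_le _) (pvIdx_le_length l x)
      rw [pvAFind_eq, hb]
      by_cases hlt : pvIdx l x < l.length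
      · rw [if_pos hlt]
        have hmin : min (Int.ofNat (pvIdx l x)) ((l.length : Int) - 1) = Int.ofNat (pvIdx l x) := by
          apply min_eq_left
          simp only [Int.ofNat_eq_natCast]
          omega
        rw [hmin]
        simp
      · rw [if_neg hlt]
        have heq : pvIdx l x = l.length := le_antisymm (pvIdx_le_length l x) (not_lt.mp hlt)
        rw [heq]
        have hmin : min (Int.ofNat l.length) ((l.length : Int) - 1) = (l.length : Int) - 1 := by
          apply min_eq_right
          simp only [Int.ofNat_eq_natCast]
          omega
        rw [hmin]
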